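-- pv_equiv track=rewrite | github.com/ak-eventhorizon/Python_Projects | uid_validator/uid_validator.py | validate_uid
-- ===== SOURCE A (Python) =====
-- def validate_uid(s: str) -> bool:
--     """
--     Check if string is valid UID
--
--     A valid UID must follow the rules below:
--     1) It must contain at least 2 uppercase English alphabet characters.
--     2) It must contain at least 3 digits (0-9).
--     3) It should only contain alphanumeric characters (a-z,A-Z & 0-9).
--     4) No character should repeat.
--     5) There must be exactly 10 characters in a valid UID.
--
--     :param s:
--     :return:
--     """
--
--     uppercase = 'ABCDEFGHIJKLMNOPQRSTUVWXYZ'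
--     lowercase = 'abcdefghijklmnopqrstuvwxyz'
--     digits = '0123456789'
--
--     presented_upper = set()
--     presented_lower = set()
--     presented_digits = set()
--
--     c1 = False  # condition 1 - contain at least 2 uppercase English alphabet characters
--     c2 = False  # condition 2 - contain at least 3 digits (0-9)
--     c3 = False  # condition 3 - only contain alphanumeric characters (a-z,A-Z & 0-9)
--     c4 = False  # condition 4 - no character should repeat
--     c5 = False  # condition 5 - there must be exactly 10 characters
--
--     for char in s:
--         if char in uppercase:
--             presented_upper.add(char)
--         elif char in lowercase:
--             presented_lower.add(char)
--         elif char in digits: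
--             presented_digits.add(char)
--         else:
--             return False
--
--     if len(presented_upper) >= 2:
--         c1 = True
--
--     if len(presented_digits) >= 3:
--         c2 = True
--
--     if len(presented_upper) + len(presented_lower) + len(presented_digits) == len(s) == 10:
--         c3 = True
--         c4 = True
--         c5 = True
--
--     uid_is_valid = c1 and c2 and c3 and c4 and c5
--
--     return uid_is_valid
-- ===== SOURCE B (Python) =====
-- def validate_uid(s: str) -> bool:
--     uppercase = 'ABCDEFGHIJKLMNOPQRSTUVWXYZ'
--     lowercase = 'abcdefghijklmnopqrstuvwxyz'
--     digits = '0123456789'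
--
--     if len(s) != 10:
--         return False
--     if len(set(s)) != 10:
--         return False
--     allowed = uppercase + lowercase + digits
--     if any(c not in allowed for c in s):
--         return False
--     return sum(c in uppercase for c in s) >= 2 and sum(c in digits for c in s) >= 3
-- ===== Notes on version B (the rewrite author's own statement) =====
-- stated objective: simpler
-- what changed: A builds three character sets in one classifying loop and compares set sizes; B is a guard-clause chain: length check first, uniqueness via len(set(s)), an allowed-alphabet scan, then two direct occurrence counts.
import Mathlib
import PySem

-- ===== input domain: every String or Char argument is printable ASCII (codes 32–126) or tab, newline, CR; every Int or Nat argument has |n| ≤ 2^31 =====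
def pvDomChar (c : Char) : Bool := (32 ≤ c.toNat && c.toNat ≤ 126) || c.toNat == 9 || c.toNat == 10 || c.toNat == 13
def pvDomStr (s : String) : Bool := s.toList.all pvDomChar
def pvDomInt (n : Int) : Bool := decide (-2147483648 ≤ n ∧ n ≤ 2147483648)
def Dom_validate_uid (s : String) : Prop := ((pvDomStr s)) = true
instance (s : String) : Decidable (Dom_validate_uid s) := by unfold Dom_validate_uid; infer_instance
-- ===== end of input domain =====

-- B replaces A's single set-building loop by guard clauses (length, set-size uniqueness,
-- allowed-alphabet scan) followed by two direct occurrence counts: simpler decomposition.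

-- ===== PORT A =====
def pvUpper : List Char := "ABCDEFGHIJKLMNOPQRSTUVWXYZ".toList
def pvLower : List Char := "abcdefghijklmnopqrstuvwxyz".toList
def pvDigits : List Char := "0123456789".toList

-- the for-loop of A: three accumulated sets, early `return False` modelled by `none`
def pvALoop : List Char → PySem.Set Char → PySem.Set Char → PySem.Set Char →
    Option (PySem.Set Char × PySem.Set Char × PySem.Set Char)
  | [], u, l, d => some (u, l, d)
  | c :: cs, u, l, d =>
    if c ∈ pvUpper then pvALoop cs (PySem.Set.add u c) l d
    else if c ∈ pvLower then pvALoop cs u (PySem.Set.add l c) d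
    else if c ∈ pvDigits then pvALoop cs u l (PySem.Set.add d c)
    else none

def validate_uid (s : String) : Bool :=
  match pvALoop s.toList PySem.Set.empty PySem.Set.empty PySem.Set.empty with
  | none => false
  | some (u, l, d) =>
    let c1 := decide (2 ≤ u.length)
    let c2 := decide (3 ≤ d.length)
    let c345 := decide (u.length + l.length + d.length = s.toList.length ∧ s.toList.length = 10)
    c1 && c2 && c345

-- ===== PORT B =====
def validate_uid_alt (s : String) : Bool :=
  let cs := s.toList
  if cs.length ≠ 10 then false
  else if (PySem.Set.ofList cs).length ≠ 10 then false
  else if cs.any (fun c => !((pvUpper ++ pvLower ++ pvDigits).contains c)) then false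
  else decide (2 ≤ cs.countP (fun c => pvUpper.contains c)) &&
       decide (3 ≤ cs.countP (fun c => pvDigits.contains c))

-- ===== PRECONDITION & SPEC =====
def Spec_validate_uid (s : String) (out : Bool) : Prop := out = validate_uid_alt s
instance (s : String) (out : Bool) : Decidable (Spec_validate_uid s out) := by unfold Spec_validate_uid; infer_instance

-- ===== CLAIM (what is proved, stated in full; the proofs are below) =====
def Claim_equal_validate_uid : Prop := ∀ (s : String), Dom_validate_uid s → Spec_validate_uid s (validate_uid s)

-- ===== LEMMAS AND PROOFS =====

lemma pvUpper_disj : ∀ c ∈ pvUpper, c ∉ pvLower ∧ c ∉ pvDigits := by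
  have h : pvUpper.all (fun c => !(pvLower.contains c) && !(pvDigits.contains c)) = true := by
    decide
  rw [List.all_eq_true] at h
  intro c hc
  simpa using h c hc

lemma pvLower_disj : ∀ c ∈ pvLower, c ∉ pvDigits := by
  have h : pvLower.all (fun c => !(pvDigits.contains c)) = true := by decide
  rw [List.all_eq_true] at h
  intro c hc
  simpa using h c hc

lemma pvALoop_eq (cs : List Char) (u l d : PySem.Set Char) :
    pvALoop cs u l d =
      if ∀ c ∈ cs, c ∈ pvUpper ∨ c ∈ pvLower ∨ c ∈ pvDigits then
        some (PySem.Set.update u (cs.filter (fun c => pvUpper.contains c)),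
              PySem.Set.update l (cs.filter (fun c => pvLower.contains c)),
              PySem.Set.update d (cs.filter (fun c => pvDigits.contains c)))
      else none := by
  induction cs generalizing u l d with
  | nil => simp [pvALoop, PySem.Set.update]
  | cons c cs ih =>
    by_cases hu : c ∈ pvUpper
    · have hnl : c ∉ pvLower := (pvUpper_disj c hu).1
      have hnd : c ∉ pvDigits := (pvUpper_disj c hu).2
      simp only [pvALoop, if_pos hu, ih]
      simp [hu, hnl, hnd, PySem.Set.update_cons]
    · by_cases hl : c ∈ pvLower
      · have hnd : c ∉ pvDigits := pvLower_disj c hl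
        simp only [pvALoop, if_neg hu, if_pos hl, ih]
        simp [hu, hl, hnd, PySem.Set.update_cons]
      · by_cases hd : c ∈ pvDigits
        · simp only [pvALoop, if_neg hu, if_neg hl, if_pos hd, ih]
          simp [hu, hl, hd, PySem.Set.update_cons]
        · simp only [pvALoop, if_neg hu, if_neg hl, if_neg hd]
          rw [if_neg]
          intro h
          rcases h c (by simp) with h' | h' | h' <;> [exact hu h'; exact hl h'; exact hd h']

lemma pvOfList_sublist {α : Type} [BEq α] [LawfulBEq α] (xs : List α) :
    (PySem.Set.ofList xs).Sublist xs := by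
  induction xs with
  | nil => simp [PySem.Set.ofList, PySem.Set.empty]
  | cons x xs ih =>
    rw [PySem.Set.ofList_cons]
    exact List.Sublist.cons₂ x ((by simp [PySem.Set.discard] : ((PySem.Set.ofList xs).discard x).Sublist (PySem.Set.ofList xs)).trans ih)

lemma pvNodup_of_len {α : Type} [BEq α] [LawfulBEq α] (xs : List α)
    (h : (PySem.Set.ofList xs).length = xs.length) : xs.Nodup := by
  have := (pvOfList_sublist xs).eq_of_length h
  rw [← this]
  exact PySem.Set.nodup_ofList xs

-- partition of the deduplicated characters into the three classes
lemma pvPartition (cs : List Char) (hall : ∀ c ∈ cs, c ∈ pvUpper ∨ c ∈ pvLower ∨ c ∈ pvDigits) :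
    (PySem.Set.ofList cs).length =
      (PySem.Set.ofList (cs.filter (fun c => pvUpper.contains c))).length +
      (PySem.Set.ofList (cs.filter (fun c => pvLower.contains c))).length +
      (PySem.Set.ofList (cs.filter (fun c => pvDigits.contains c))).length := by
  set U := PySem.Set.ofList (cs.filter (fun c => pvUpper.contains c)) with hU
  set L := PySem.Set.ofList (cs.filter (fun c => pvLower.contains c)) with hL
  set D := PySem.Set.ofList (cs.filter (fun c => pvDigits.contains c)) with hD
  have memU : ∀ x, x ∈ U ↔ x ∈ cs ∧ x ∈ pvUpper := by
    intro x; rw [hU, PySem.Set.mem_ofList]; simp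
  have memL : ∀ x, x ∈ L ↔ x ∈ cs ∧ x ∈ pvLower := by
    intro x; rw [hL, PySem.Set.mem_ofList]; simp
  have memD : ∀ x, x ∈ D ↔ x ∈ cs ∧ x ∈ pvDigits := by
    intro x; rw [hD, PySem.Set.mem_ofList]; simp
  have hperm : (PySem.Set.ofList cs).Perm (U ++ L ++ D) := by
    rw [List.perm_ext_iff_of_nodup (PySem.Set.nodup_ofList cs) ?_]
    · intro x
      rw [PySem.Set.mem_ofList]
      simp only [List.mem_append, memU, memL, memD]
      constructor
      · intro hx
        rcases hall x hx with h | h | h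
        · exact Or.inl (Or.inl ⟨hx, h⟩)
        · exact Or.inl (Or.inr ⟨hx, h⟩)
        · exact Or.inr ⟨hx, h⟩
      · rintro ((⟨h, _⟩ | ⟨h, _⟩) | ⟨h, _⟩) <;> exact h
    · refine ((PySem.Set.nodup_ofList _).append (PySem.Set.nodup_ofList _) ?_).append
        (PySem.Set.nodup_ofList _) ?_
      · intro x hx hx'
        exact (pvUpper_disj x ((memU x).1 hx).2).1 ((memL x).1 hx').2
      · intro x hx hx'
        rcases List.mem_append.1 hx with h | h
        · exact (pvUpper_disj x ((memU x).1 h).2).2 ((memD x).1 hx').2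
        · exact pvLower_disj x ((memL x).1 h).2 ((memD x).1 hx').2
  have hl := hperm.length_eq
  simp only [List.length_append] at hl
  omega

-- ===== VERDICT (by name: the statement is the Claim_ definition above) =====
set_option maxHeartbeats 1000000 in
theorem validate_uid_spec : Claim_equal_validate_uid := by
  intro s _
  unfold Spec_validate_uid validate_uid validate_uid_alt
  set cs := s.toList with hcs
  rw [pvALoop_eq]
  by_cases hall : ∀ c ∈ cs, c ∈ pvUpper ∨ c ∈ pvLower ∨ c ∈ pvDigits
  · rw [if_pos hall]
    have hupd : ∀ xs : List Char, PySem.Set.update PySem.Set.empty xs = PySem.Set.ofList xs :=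
      fun _ => rfl
    simp only [hupd]
    by_cases hlen : cs.length = 10
    · by_cases hset : (PySem.Set.ofList cs).length = 10
      · -- all distinct: both reduce to the two count conditions
        have hnd : cs.Nodup := pvNodup_of_len cs (by rw [hset, hlen])
        have hsum := pvPartition cs hall
        have hany : cs.any (fun c => !((pvUpper ++ pvLower ++ pvDigits).contains c)) = false := by
          rw [List.any_eq_false]
          intro c hc
          rcases hall c hc with h | h | h <;> simp [h]
        have hcount : ∀ p : Char → Bool,
            (PySem.Set.ofList (cs.filter p)).length = cs.countP p := by
          intro p
          rw [show PySem.Set.ofList (cs.filter p) = cs.filter p from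
            PySem.Set.ofList_eq_self_of_nodup _ (hnd.filter p)]
          simp [List.countP_eq_length_filter]
        rw [if_neg (by simp [hlen]), if_neg (by simp [hset]), if_neg (by rw [hany]; simp)]
        simp only [hcount]
        have hprop : (cs.countP (fun c => pvUpper.contains c) +
            cs.countP (fun c => pvLower.contains c) +
            cs.countP (fun c => pvDigits.contains c) = cs.length ∧ cs.length = 10) :=
          ⟨by rw [← hcount, ← hcount, ← hcount, ← hsum, hset, hlen], hlen⟩
        simp only [List.contains_eq_mem] at hprop
        simp [hprop]
      · -- a repeated character: A's sum-of-set-sizes test fails, B's set-size guard fails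
        have hsum := pvPartition cs hall
        rw [if_neg (by simp [hlen]), if_pos (by simp [hset])]
        have : ¬ ((PySem.Set.ofList (cs.filter (fun c => pvUpper.contains c))).length +
            (PySem.Set.ofList (cs.filter (fun c => pvLower.contains c))).length +
            (PySem.Set.ofList (cs.filter (fun c => pvDigits.contains c))).length = cs.length ∧
            cs.length = 10) := by
          rintro ⟨h1, h2⟩
          exact hset (by rw [hsum, h1, h2])
        simp only [decide_eq_false this, Bool.and_false]
    · -- wrong length: both false
      rw [if_pos (by simp [hlen])]
      have : ¬ ((PySem.Set.ofList (cs.filter (fun c => pvUpper.contains c))).length +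
          (PySem.Set.ofList (cs.filter (fun c => pvLower.contains c))).length +
          (PySem.Set.ofList (cs.filter (fun c => pvDigits.contains c))).length = cs.length ∧
          cs.length = 10) := by rintro ⟨_, h⟩; exact hlen h
      simp only [decide_eq_false this, Bool.and_false]
  · -- a forbidden character: A's loop returns early, B's alphabet guard fires
    rw [if_neg hall]
    show false = _
    simp
    intro _ _ h3 _
    exact absurd (fun c hc => by
      by_cases hU : c ∈ pvUpper
      · exact Or.inl hU
      · by_cases hL : c ∈ pvLower
        · exact Or.inr (Or.inl hL)
        · exact Or.inr (Or.inr (h3 c hc hU hL))) hall
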